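-- pv_equiv track=rewrite | github.com/leichainju/pa-former | preprocess/structure_bias.py | _gen_stok_rel_path_map
-- ===== SOURCE A (Python) =====
-- def _gen_stok_rel_path_map(stok_to_tok_idx, tok_path_assign):
--     stok_path_map = [] # (i, j, p_idx)
--     for i in range(len(stok_to_tok_idx)):
--         src_idx = stok_to_tok_idx[i]
--         for j in range(i + 1, len(stok_to_tok_idx)):
--             tgt_idx = stok_to_tok_idx[j]
--             if (src_idx, tgt_idx) in tok_path_assign:
--                 path_idx = tok_path_assign[(src_idx, tgt_idx)]
--                 stok_path_map.append((i, j, path_idx))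
--     return stok_path_map
-- ===== SOURCE B (Python) =====
-- def _gen_stok_rel_path_map(stok_to_tok_idx, tok_path_assign):
--     # inverse index: token index -> ascending list of subtoken positions
--     tok_pos = {}
--     for i, tok in enumerate(stok_to_tok_idx):
--         tok_pos.setdefault(tok, []).append(i)
--     triples = []
--     for (src_idx, tgt_idx), path_idx in tok_path_assign.items():
--         for i in tok_pos.get(src_idx, []):
--             for j in tok_pos.get(tgt_idx, []):
--                 if i < j:
--                     triples.append((i, j, path_idx))
--     return sorted(triples, key=lambda t: (t[0], t[1]))
-- ===== Notes on version B (the rewrite author's own statement) =====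
-- stated objective: faster
-- what changed: Instead of scanning all O(n^2) subtoken pairs and probing the path dict for each, B builds an inverse index token->positions once, emits triples only for the keys actually present in tok_path_assign, and sorts them by (i, j) to reproduce A's pair order.
import Mathlib
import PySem

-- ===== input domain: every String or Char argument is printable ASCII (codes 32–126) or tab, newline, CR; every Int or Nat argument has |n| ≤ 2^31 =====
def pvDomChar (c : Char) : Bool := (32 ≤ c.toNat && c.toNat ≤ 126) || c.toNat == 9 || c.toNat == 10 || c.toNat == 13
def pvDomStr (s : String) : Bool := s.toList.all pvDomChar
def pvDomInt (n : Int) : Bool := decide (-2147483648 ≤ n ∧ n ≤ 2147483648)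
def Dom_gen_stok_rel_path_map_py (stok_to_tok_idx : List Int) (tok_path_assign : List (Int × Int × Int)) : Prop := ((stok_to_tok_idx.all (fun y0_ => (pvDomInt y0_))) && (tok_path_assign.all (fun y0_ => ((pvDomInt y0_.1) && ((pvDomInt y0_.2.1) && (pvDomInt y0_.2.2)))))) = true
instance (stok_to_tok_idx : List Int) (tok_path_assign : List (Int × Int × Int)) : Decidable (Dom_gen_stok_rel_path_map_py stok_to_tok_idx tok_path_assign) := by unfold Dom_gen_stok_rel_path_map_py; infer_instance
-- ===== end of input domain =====

-- B replaces A's O(n^2) scan over all subtoken pairs by an inverse index token -> positions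
-- driven from the entries of tok_path_assign, sorting the collected triples by (i, j).


-- ===== PORT A =====
-- entry test '(src, tgt) in tok_path_assign' / lookup 'tok_path_assign[(src, tgt)]' on the
-- dict encoded as an association list: first matching binding (the convention's first-match rule)
def pvKeyMatch (s t : Int) (e : Int × Int × Int) : Bool := e.1 == s && e.2.1 == t

def gen_stok_rel_path_map_py (stok_to_tok_idx : List Int) (tok_path_assign : List (Int × Int × Int)) : List (Int × Int × Int) :=
  (PySem.List.pyRange 0 (PySem.List.len stok_to_tok_idx) 1).foldl (fun acc i =>
    let src := PySem.List.pyGetD stok_to_tok_idx i 0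
    (PySem.List.pyRange (i + 1) (PySem.List.len stok_to_tok_idx) 1).foldl (fun acc2 j =>
      let tgt := PySem.List.pyGetD stok_to_tok_idx j 0
      match tok_path_assign.find? (pvKeyMatch src tgt) with
      | some e => acc2 ++ [(i, j, e.2.2)]
      | none => acc2) acc) []

-- ===== PORT B =====
-- '.items()' of the dict encoded as an association list: first binding per key, in order
-- (first-match convention; exact where the list has distinct (src, tgt) keys, i.e. encodes a dict)
def pvDedupKeys (d : List (Int × Int × Int)) : List (Int × Int × Int) :=
  d.foldl (fun acc e => if acc.any (pvKeyMatch e.1 e.2.1) then acc else acc ++ [e]) []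

-- 'tok_pos.setdefault(tok, []).append(i)' over 'enumerate(stok_to_tok_idx)'
def pvTokPos (a : List Int) : PySem.Dict Int (List Int) :=
  (PySem.List.enumerate a 0).foldl (fun dct p => dct.modify p.2 [] (· ++ [p.1])) PySem.Dict.empty

def gen_stok_rel_path_map_py_alt (stok_to_tok_idx : List Int) (tok_path_assign : List (Int × Int × Int)) : List (Int × Int × Int) :=
  let tokPos := pvTokPos stok_to_tok_idx
  let triples := (pvDedupKeys tok_path_assign).foldl (fun acc e =>
    (tokPos.getD e.1 []).foldl (fun acc2 i =>
      (tokPos.getD e.2.1 []).foldl (fun acc3 j =>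
        if i < j then acc3 ++ [(i, j, e.2.2)] else acc3) acc2) acc) []
  PySem.List.sorted2 triples (fun t => t.1) (fun t => t.2.1)

-- ===== PRECONDITION & SPEC =====
def Spec_gen_stok_rel_path_map_py (stok_to_tok_idx : List Int) (tok_path_assign : List (Int × Int × Int)) (out : List (Int × Int × Int)) : Prop := out = gen_stok_rel_path_map_py_alt stok_to_tok_idx tok_path_assign
instance (stok_to_tok_idx : List Int) (tok_path_assign : List (Int × Int × Int)) (out : List (Int × Int × Int)) : Decidable (Spec_gen_stok_rel_path_map_py stok_to_tok_idx tok_path_assign out) := by unfold Spec_gen_stok_rel_path_map_py; infer_instance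

-- ===== CLAIM (what is proved, stated in full; the proofs are below) =====
def Claim_equal_gen_stok_rel_path_map_py : Prop := ∀ (stok_to_tok_idx : List Int) (tok_path_assign : List (Int × Int × Int)), Dom_gen_stok_rel_path_map_py stok_to_tok_idx tok_path_assign → Spec_gen_stok_rel_path_map_py stok_to_tok_idx tok_path_assign (gen_stok_rel_path_map_py stok_to_tok_idx tok_path_assign)

-- ===== LEMMAS AND PROOFS =====

-- The lexicographic strict order on the (i, j) components of a triple.
def pvLexLt (x y : Int × Int × Int) : Prop := x.1 < y.1 ∨ (x.1 = y.1 ∧ x.2.1 < y.2.1)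

-- the option produced for the pair (i, j) by A's body
def pvFind (a : List Int) (d : List (Int × Int × Int)) (i j : Int) : Option (Int × Int × Int) :=
  d.find? (pvKeyMatch (PySem.List.pyGetD a i 0) (PySem.List.pyGetD a j 0))

-- the list of positions of token t
def pvPos (a : List Int) (t : Int) : List Int :=
  ((PySem.List.enumerate a 0).filter (fun p => p.2 == t)).map (·.1)

-- A's output, as a nested flatMap
lemma A_eq (a : List Int) (d : List (Int × Int × Int)) :
    gen_stok_rel_path_map_py a d
      = (PySem.List.pyRange 0 (PySem.List.len a) 1).flatMap (fun i =>
          (PySem.List.pyRange (i + 1) (PySem.List.len a) 1).flatMap (fun j =>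
            ((pvFind a d i j).map (fun e => (i, j, e.2.2))).toList)) := by
  unfold gen_stok_rel_path_map_py
  rw [PySem.List.foldl_congr_mem _ _
    (fun acc i => acc ++ (PySem.List.pyRange (i + 1) (PySem.List.len a) 1).flatMap (fun j =>
      ((pvFind a d i j).map (fun e => (i, j, e.2.2))).toList)) _ ?_]
  · rw [PySem.List.foldl_append_eq_flatMap]; simp
  · intro acc i _
    rw [PySem.List.foldl_congr_mem _ _
      (fun acc2 j => acc2 ++ ((pvFind a d i j).map (fun e => (i, j, e.2.2))).toList) _ ?_]
    · rw [PySem.List.foldl_append_eq_flatMap]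
    · intro acc2 j _
      unfold pvFind
      cases h : d.find? (pvKeyMatch (PySem.List.pyGetD a i 0) (PySem.List.pyGetD a j 0)) <;>
        simp [h]

-- B's triple list, as a nested flatMap
lemma B_triples_eq (a : List Int) (d : List (Int × Int × Int)) :
    ((pvDedupKeys d).foldl (fun acc e =>
      (pvPos a e.1).foldl (fun acc2 i =>
        (pvPos a e.2.1).foldl (fun acc3 j =>
          if i < j then acc3 ++ [(i, j, e.2.2)] else acc3) acc2) acc) [])
      = (pvDedupKeys d).flatMap (fun e =>
          (pvPos a e.1).flatMap (fun i =>
            ((pvPos a e.2.1).filter (fun j => i < j)).map (fun j => (i, j, e.2.2)))) := by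
  rw [PySem.List.foldl_congr_mem _ _
    (fun acc e => acc ++ (pvPos a e.1).flatMap (fun i =>
      ((pvPos a e.2.1).filter (fun j => i < j)).map (fun j => (i, j, e.2.2)))) _ ?_]
  · rw [PySem.List.foldl_append_eq_flatMap]; simp
  · intro acc e _
    rw [PySem.List.foldl_congr_mem _ _
      (fun acc2 i => acc2 ++ ((pvPos a e.2.1).filter (fun j => i < j)).map
        (fun j => (i, j, e.2.2))) _ ?_]
    · rw [PySem.List.foldl_append_eq_flatMap]
    · intro acc2 i _
      exact PySem.List.foldl_append_ite (fun j => i < j) (fun j => (i, j, e.2.2)) _ _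

lemma tokPos_getD (a : List Int) (t : Int) :
    (pvTokPos a).getD t [] = pvPos a t := by
  unfold pvTokPos pvPos
  have h : (PySem.List.enumerate a 0).foldl (fun dct p => dct.modify p.2 [] (· ++ [p.1]))
        (PySem.Dict.empty : PySem.Dict Int (List Int))
      = ((PySem.List.enumerate a 0).map (fun p => (p.2, p.1))).foldl
          (fun dct p => dct.modify p.1 [] (· ++ [p.2])) PySem.Dict.empty := by
    rw [List.foldl_map]
  rw [h, PySem.Dict.getD_foldl_modify_append]
  simp [List.filter_map, List.map_map, Function.comp_def]

lemma mem_pvPos (a : List Int) (t : Int) (i : Int) :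
    i ∈ pvPos a t ↔ ∃ (k : Nat) (h : k < a.length), i = (k : Int) ∧ a[k] = t := by
  unfold pvPos
  simp only [List.mem_map, List.mem_filter, PySem.List.mem_enumerate_iff]
  constructor
  · rintro ⟨p, ⟨⟨k, hk, rfl⟩, hpt⟩, rfl⟩
    simp only [beq_iff_eq] at hpt
    exact ⟨k, hk, by simp, hpt⟩
  · rintro ⟨k, hk, rfl, hat⟩
    exact ⟨((k : Int), a[k]), ⟨⟨k, hk, by simp⟩, by simp [hat]⟩, rfl⟩

lemma pairwise_pvPos (a : List Int) (t : Int) : (pvPos a t).Pairwise (· < ·) := by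
  unfold pvPos
  rw [List.pairwise_map]
  exact (PySem.List.pairwise_lt_enumerate a 0).filter _

lemma keyMatch_eq_of_keys (e x : Int × Int × Int) (h1 : x.1 = e.1) (h2 : x.2.1 = e.2.1) :
    pvKeyMatch x.1 x.2.1 = pvKeyMatch e.1 e.2.1 := by rw [h1, h2]

lemma dedup_aux (d : List (Int × Int × Int)) : ∀ (acc : List (Int × Int × Int))
    (e : Int × Int × Int),
    e ∈ d.foldl (fun acc x => if acc.any (pvKeyMatch x.1 x.2.1) then acc else acc ++ [x]) acc ↔
      e ∈ acc ∨ (acc.any (pvKeyMatch e.1 e.2.1) = false ∧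
        d.find? (pvKeyMatch e.1 e.2.1) = some e) := by
  induction d with
  | nil => intro acc e; simp
  | cons x d' ih =>
    intro acc e
    simp only [List.foldl_cons]
    by_cases hkey : pvKeyMatch e.1 e.2.1 x = true
    · rw [List.find?_cons_of_pos hkey]
      have hx1 : x.1 = e.1 ∧ x.2.1 = e.2.1 := by
        simpa [pvKeyMatch, Bool.and_eq_true, beq_iff_eq] using hkey
      have hsame : pvKeyMatch x.1 x.2.1 = pvKeyMatch e.1 e.2.1 :=
        keyMatch_eq_of_keys e x hx1.1 hx1.2
      by_cases hacc : acc.any (pvKeyMatch e.1 e.2.1) = true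
      · rw [if_pos (by rw [hsame]; exact hacc), ih]
        simp [hacc]
      · have hacc' : acc.any (pvKeyMatch e.1 e.2.1) = false := by simpa using hacc
        rw [if_neg (by rw [hsame]; simpa using hacc), ih]
        have hnew : (acc ++ [x]).any (pvKeyMatch e.1 e.2.1) = true := by
          simp [List.any_append, hkey]
        simp [List.mem_append, hnew, hacc', eq_comm]
    · have hkey' : pvKeyMatch e.1 e.2.1 x = false := by simpa using hkey
      rw [List.find?_cons_of_neg (by simp [hkey'])]
      by_cases hacc : acc.any (pvKeyMatch x.1 x.2.1) = true
      · rw [if_pos hacc, ih]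
      · rw [if_neg (by simpa using hacc), ih]
        have hne : e ≠ x := by
          rintro rfl
          exact hkey (by simp [pvKeyMatch])
        have hsameany : (acc ++ [x]).any (pvKeyMatch e.1 e.2.1)
            = acc.any (pvKeyMatch e.1 e.2.1) := by
          simp [List.any_append, hkey']
        simp [List.mem_append, hsameany, hne]

lemma mem_pvDedupKeys (d : List (Int × Int × Int)) (e : Int × Int × Int) :
    e ∈ pvDedupKeys d ↔ d.find? (pvKeyMatch e.1 e.2.1) = some e := by
  unfold pvDedupKeys
  rw [dedup_aux]
  simp

lemma pairwise_keys_pvDedupKeys (d : List (Int × Int × Int)) :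
    (pvDedupKeys d).Pairwise (fun e f => e.1 ≠ f.1 ∨ e.2.1 ≠ f.2.1) := by
  unfold pvDedupKeys
  suffices h : ∀ (acc : List (Int × Int × Int)),
      acc.Pairwise (fun e f => e.1 ≠ f.1 ∨ e.2.1 ≠ f.2.1) →
      (d.foldl (fun acc x => if acc.any (pvKeyMatch x.1 x.2.1) then acc else acc ++ [x])
        acc).Pairwise (fun e f => e.1 ≠ f.1 ∨ e.2.1 ≠ f.2.1) from h [] (by simp)
  induction d with
  | nil => intro acc h; simpa using h
  | cons x d' ih =>
    intro acc h
    simp only [List.foldl_cons]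
    by_cases hacc : acc.any (pvKeyMatch x.1 x.2.1) = true
    · rw [if_pos hacc]; exact ih acc h
    · rw [if_neg (by simpa using hacc)]
      refine ih _ ?_
      rw [List.pairwise_append]
      refine ⟨h, by simp, ?_⟩
      intro e he f hf
      rw [List.mem_singleton] at hf
      rw [hf]
      have hm := (List.any_eq_false ..).mp (by simpa using hacc) e he
      have himp : e.1 = x.1 → ¬ e.2.1 = x.2.1 := by
        simpa [pvKeyMatch, Bool.and_eq_true, beq_iff_eq, not_and_or] using hm
      by_cases h1 : e.1 = x.1
      · exact Or.inr (himp h1)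
      · exact Or.inl h1

lemma find?_key (d : List (Int × Int × Int)) (s t : Int) (e : Int × Int × Int)
    (h : d.find? (pvKeyMatch s t) = some e) : e.1 = s ∧ e.2.1 = t := by
  have := List.find?_some h
  simp only [pvKeyMatch, Bool.and_eq_true, beq_iff_eq] at this
  exact this

lemma pairwise_flatMap_of_proj {γ : Type} (R : γ → γ → Prop) (f : γ → Int)
    (l : List Int) (g : Int → List γ)
    (hl : l.Pairwise (· < ·)) (hproj : ∀ i x, x ∈ g i → f x = i)
    (hcross : ∀ x y, f x < f y → R x y) (hin : ∀ i, (g i).Pairwise R) :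
    (l.flatMap g).Pairwise R := by
  induction l with
  | nil => simp
  | cons b l' ih =>
    rw [List.flatMap_cons, List.pairwise_append]
    rcases List.pairwise_cons.mp hl with ⟨hb, hl'⟩
    refine ⟨hin b, ih hl', ?_⟩
    intro x hx y hy
    rcases List.mem_flatMap.mp hy with ⟨c, hc, hyc⟩
    refine hcross x y ?_
    rw [hproj b x hx, hproj c y hyc]
    exact hb c hc

lemma nodup_flatMap_of {β γ : Type} (Q : β → β → Prop) (l : List β) (g : β → List γ)
    (hl : l.Pairwise Q) (hg : ∀ b ∈ l, (g b).Nodup)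
    (hcross : ∀ b c, Q b c → ∀ x ∈ g b, ∀ y ∈ g c, x ≠ y) : (l.flatMap g).Nodup := by
  induction l with
  | nil => simp
  | cons b l' ih =>
    rw [List.flatMap_cons, List.nodup_append]
    rcases List.pairwise_cons.mp hl with ⟨hb, hl'⟩
    refine ⟨hg b (by simp), ih hl' (fun c hc => hg c (by simp [hc])), ?_⟩
    intro x hx y hy
    rcases List.mem_flatMap.mp hy with ⟨c, hc, hyc⟩
    exact hcross b c (hb c hc) x hx y hyc

-- membership characterisations
lemma mem_A (a : List Int) (d : List (Int × Int × Int)) (x : Int × Int × Int) :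
    x ∈ gen_stok_rel_path_map_py a d ↔
      ∃ e, pvFind a d x.1 x.2.1 = some e ∧ x.2.2 = e.2.2 ∧
        0 ≤ x.1 ∧ x.1 < x.2.1 ∧ x.2.1 < (a.length : Int) := by
  obtain ⟨x1, x2, x3⟩ := x
  rw [A_eq]
  simp only [List.mem_flatMap, Option.mem_toList, Option.map_eq_some_iff,
    PySem.List.mem_pyRange_one, PySem.List.len_eq]
  constructor
  · rintro ⟨i, ⟨hi0, hin⟩, j, ⟨hj1, hj2⟩, e, he, hx⟩
    obtain ⟨rfl, rfl, rfl⟩ : i = x1 ∧ j = x2 ∧ e.2.2 = x3 := by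
      injection hx with h1 h2; injection h2 with h2 h3; exact ⟨h1, h2, h3⟩
    exact ⟨e, he, rfl, hi0, by omega, hj2⟩
  · rintro ⟨e, he, rfl, h0, hlt, hn⟩
    exact ⟨x1, ⟨h0, by omega⟩, x2, ⟨by omega, hn⟩, e, he, rfl⟩

lemma mem_B_triples (a : List Int) (d : List (Int × Int × Int)) (x : Int × Int × Int) :
    x ∈ (pvDedupKeys d).flatMap (fun e =>
          (pvPos a e.1).flatMap (fun i =>
            ((pvPos a e.2.1).filter (fun j => i < j)).map (fun j => (i, j, e.2.2)))) ↔
      ∃ e, e ∈ pvDedupKeys d ∧ x.1 ∈ pvPos a e.1 ∧ x.2.1 ∈ pvPos a e.2.1 ∧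
        x.1 < x.2.1 ∧ x.2.2 = e.2.2 := by
  obtain ⟨x1, x2, x3⟩ := x
  simp only [List.mem_flatMap, List.mem_map, List.mem_filter, decide_eq_true_eq]
  constructor
  · rintro ⟨e, he, i, hi, j, ⟨hj, hij⟩, hx⟩
    obtain ⟨rfl, rfl, rfl⟩ : i = x1 ∧ j = x2 ∧ e.2.2 = x3 := by
      injection hx with h1 h2; injection h2 with h2 h3; exact ⟨h1, h2, h3⟩
    exact ⟨e, he, hi, hj, hij, rfl⟩
  · rintro ⟨e, he, hi, hj, hij, rfl⟩
    exact ⟨e, he, x1, hi, x2, ⟨hj, hij⟩, rfl⟩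

lemma pairwise_A (a : List Int) (d : List (Int × Int × Int)) :
    (gen_stok_rel_path_map_py a d).Pairwise pvLexLt := by
  rw [A_eq]
  refine pairwise_flatMap_of_proj pvLexLt (fun t => t.1) _ _
    (PySem.List.pairwise_lt_pyRange_one 0 _) ?_ (fun x y h => Or.inl h) ?_
  · intro i x hx
    rcases List.mem_flatMap.mp hx with ⟨j, _, hxj⟩
    simp only [Option.mem_toList, Option.map_eq_some_iff] at hxj
    obtain ⟨e, _, rfl⟩ := hxj
    rfl
  · intro i
    have hproj : ∀ (j : Int) (x : Int × Int × Int),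
        x ∈ ((pvFind a d i j).map (fun e => (i, j, e.2.2))).toList → x.2.1 = j ∧ x.1 = i := by
      intro j x hx
      simp only [Option.mem_toList, Option.map_eq_some_iff] at hx
      obtain ⟨e, _, rfl⟩ := hx
      exact ⟨rfl, rfl⟩
    have h1 : ((PySem.List.pyRange (i + 1) (PySem.List.len a) 1).flatMap (fun j =>
        ((pvFind a d i j).map (fun e => (i, j, e.2.2))).toList)).Pairwise
          (fun x y => x.2.1 < y.2.1) := by
      refine pairwise_flatMap_of_proj _ (fun t => t.2.1) _ _
        (PySem.List.pairwise_lt_pyRange_one _ _) (fun j x hx => (hproj j x hx).1)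
        (fun x y h => h) ?_
      intro j
      cases pvFind a d i j <;> simp
    refine h1.imp_of_mem ?_
    intro p q hp hq hlt
    rcases List.mem_flatMap.mp hp with ⟨j1, _, hp1⟩
    rcases List.mem_flatMap.mp hq with ⟨j2, _, hq1⟩
    exact Or.inr ⟨((hproj j1 p hp1).2).trans ((hproj j2 q hq1).2).symm, hlt⟩

lemma nodup_B_triples (a : List Int) (d : List (Int × Int × Int)) :
    ((pvDedupKeys d).flatMap (fun e =>
      (pvPos a e.1).flatMap (fun i =>
        ((pvPos a e.2.1).filter (fun j => i < j)).map (fun j => (i, j, e.2.2))))).Nodup := by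
  refine nodup_flatMap_of (fun e f => e.1 ≠ f.1 ∨ e.2.1 ≠ f.2.1) _ _
    (pairwise_keys_pvDedupKeys d) ?_ ?_
  · intro e _
    refine nodup_flatMap_of (· < ·) _ _ (pairwise_pvPos a e.1) ?_ ?_
    · intro i _
      refine List.Nodup.map ?_ (((pairwise_pvPos a e.2.1).filter _).imp ?_)
      · intro j1 j2 h
        simpa using congrArg (fun t => t.2.1) h
      · intro j1 j2 h; exact ne_of_lt h
    · intro i1 i2 hlt x hx y hy heq
      rcases List.mem_map.mp hx with ⟨j1, _, rfl⟩
      rcases List.mem_map.mp hy with ⟨j2, _, rfl⟩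
      injection heq with h _
      exact absurd h (ne_of_lt hlt)
  · intro e f hef x hx y hy heq
    rcases List.mem_flatMap.mp hx with ⟨i1, hi1, hx1⟩
    rcases List.mem_map.mp hx1 with ⟨j1, hj1, rfl⟩
    rcases List.mem_flatMap.mp hy with ⟨i2, hi2, hy1⟩
    rcases List.mem_map.mp hy1 with ⟨j2, hj2, rfl⟩
    obtain ⟨hii, hjj⟩ : i1 = i2 ∧ j1 = j2 := by
      injection heq with h1 h2; injection h2 with h2 _; exact ⟨h1, h2⟩
    have hj1' := (List.mem_filter.mp hj1).1
    have hj2' := (List.mem_filter.mp hj2).1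
    rw [mem_pvPos] at hi1 hi2 hj1' hj2'
    obtain ⟨k1, hk1, hik1, hak1⟩ := hi1
    obtain ⟨k2, hk2, hik2, hak2⟩ := hi2
    obtain ⟨m1, hm1, hjm1, ham1⟩ := hj1'
    obtain ⟨m2, hm2, hjm2, ham2⟩ := hj2'
    have hkk : k1 = k2 := by omega
    have hmm : m1 = m2 := by omega
    rcases hef with h | h
    · subst hkk; exact h (hak1 ▸ hak2 ▸ rfl)
    · subst hmm; exact h (ham1 ▸ ham2 ▸ rfl)

lemma perm_A_B (a : List Int) (d : List (Int × Int × Int)) :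
    (gen_stok_rel_path_map_py a d).Perm
      ((pvDedupKeys d).flatMap (fun e =>
        (pvPos a e.1).flatMap (fun i =>
          ((pvPos a e.2.1).filter (fun j => i < j)).map (fun j => (i, j, e.2.2))))) := by
  have hA : (gen_stok_rel_path_map_py a d).Nodup := by
    refine (pairwise_A a d).imp ?_
    intro x y h heq
    subst heq
    rcases h with h | ⟨-, h⟩ <;> exact lt_irrefl _ h
  rw [List.perm_ext_iff_of_nodup hA (nodup_B_triples a d)]
  intro x
  rw [mem_A, mem_B_triples]
  constructor
  · rintro ⟨e, he, h22, h0, hlt, hn⟩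
    have h0' : 0 ≤ x.2.1 := le_trans h0 (le_of_lt hlt)
    have hx1 : x.1 = (x.1.toNat : Int) := (Int.toNat_of_nonneg h0).symm
    have hx2 : x.2.1 = (x.2.1.toNat : Int) := (Int.toNat_of_nonneg h0').symm
    have hk1 : x.1.toNat < a.length := by omega
    have hk2 : x.2.1.toNat < a.length := by omega
    have hg1 : PySem.List.pyGetD a x.1 0 = a[x.1.toNat] := by
      conv_lhs => rw [hx1, PySem.List.pyGetD_natCast]
      rw [List.getD_eq_getElem _ _ hk1]
    have hg2 : PySem.List.pyGetD a x.2.1 0 = a[x.2.1.toNat] := by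
      conv_lhs => rw [hx2, PySem.List.pyGetD_natCast]
      rw [List.getD_eq_getElem _ _ hk2]
    unfold pvFind at he
    obtain ⟨hk1e, hk2e⟩ := find?_key _ _ _ _ he
    refine ⟨e, ?_, ?_, ?_, hlt, h22⟩
    · rw [mem_pvDedupKeys]
      have hpred : pvKeyMatch e.1 e.2.1
          = pvKeyMatch (PySem.List.pyGetD a x.1 0) (PySem.List.pyGetD a x.2.1 0) := by
        rw [hk1e, hk2e]
      rw [hpred]; exact he
    · rw [mem_pvPos]
      exact ⟨x.1.toNat, hk1, hx1, by rw [hk1e, hg1]⟩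
    · rw [mem_pvPos]
      exact ⟨x.2.1.toNat, hk2, hx2, by rw [hk2e, hg2]⟩
  · rintro ⟨e, he, hi, hj, hlt, h22⟩
    rw [mem_pvPos] at hi hj
    obtain ⟨k1, hk1, hx1, ha1⟩ := hi
    obtain ⟨k2, hk2, hx2, ha2⟩ := hj
    rw [mem_pvDedupKeys] at he
    refine ⟨e, ?_, h22, by omega, hlt, by omega⟩
    unfold pvFind
    have hg1 : PySem.List.pyGetD a x.1 0 = e.1 := by
      conv_lhs => rw [hx1, PySem.List.pyGetD_natCast]
      rw [List.getD_eq_getElem _ _ hk1, ha1]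
    have hg2 : PySem.List.pyGetD a x.2.1 0 = e.2.1 := by
      conv_lhs => rw [hx2, PySem.List.pyGetD_natCast]
      rw [List.getD_eq_getElem _ _ hk2, ha2]
    rw [hg1, hg2]
    exact he

-- sorted2 with Int keys is sorted with the lexicographic product key
lemma sorted2_eq_sorted_lex (xs : List (Int × Int × Int)) :
    PySem.List.sorted2 xs (fun t => t.1) (fun t => t.2.1)
      = PySem.List.sorted xs (fun t => toLex (t.1, t.2.1)) := by
  unfold PySem.List.sorted2 PySem.List.sorted
  simp only [if_neg (by decide : ¬ (false = true))]
  have h : (fun (a b : Int × Int × Int) =>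
        (decide (a.1 < b.1) || (!decide (b.1 < a.1) && decide (a.2.1 < b.2.1))))
      = (fun (a b : Int × Int × Int) =>
        decide ((toLex (a.1, a.2.1) : Lex (Int × Int)) < toLex (b.1, b.2.1))) := by
    funext p q
    rw [Bool.eq_iff_iff]
    simp only [Bool.or_eq_true, Bool.and_eq_true, Bool.not_eq_true', decide_eq_true_eq,
      decide_eq_false_iff_not, Prod.Lex.lt_iff, ofLex_toLex]
    constructor
    · rintro (h1 | ⟨h1, h2⟩)
      · exact Or.inl h1
      · rcases lt_or_ge p.1 q.1 with h3 | h3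
        · exact Or.inl h3
        · exact Or.inr ⟨le_antisymm (le_of_not_gt h1) h3, h2⟩
    · rintro (h1 | ⟨h1, h2⟩)
      · exact Or.inl h1
      · exact Or.inr ⟨by omega, h2⟩
  rw [h]

-- ===== VERDICT (by name: the statement is the Claim_ definition above) =====
theorem gen_stok_rel_path_map_py_spec : Claim_equal_gen_stok_rel_path_map_py := by
  intro a d _
  show _ = gen_stok_rel_path_map_py_alt a d
  unfold gen_stok_rel_path_map_py_alt
  simp only [tokPos_getD, B_triples_eq, sorted2_eq_sorted_lex]
  refine (PySem.List.sorted_eq_of_perm_of_pairwise_lt (κ := Lex (Int × Int)) _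
    (gen_stok_rel_path_map_py a d) (fun t => toLex (t.1, t.2.1)) (perm_A_B a d) ?_).symm
  have h := pairwise_A a d
  refine h.imp ?_
  intro x y hxy
  show toLex (x.1, x.2.1) < toLex (y.1, y.2.1)
  rcases hxy with h1 | ⟨h1, h2⟩
  · exact Prod.Lex.left _ _ h1
  · rw [h1]; exact Prod.Lex.right _ h2
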